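-- pv_equiv track=rewrite | github.com/lowdrant/2048ml | 2048.py | _combine_left
-- ===== SOURCE A (Python) =====
-- def _combine_left(row):
--     """combine all numbers left; assumes no zeros inbetween"""
--     sz = len(row)
--     score = 0
--     for j in range(sz-1):
--         if row[j] == row[j+1]:
--             row[j] += row[j+1]
--             score += row[j]
--             for k in range(j+1, sz-1):
--                 row[k] = row[k+1]
--             row[sz-1] = 0  # !! don't forget to zero-fill'
--     return row, score
-- ===== SOURCE B (Python) =====
-- def _combine_left(row):
--     """combine all numbers left; assumes no zeros inbetween.
--     Single left-to-right pass: each adjacent equal pair is merged once and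
--     consumed (advance by 2), otherwise the cell is copied (advance by 1);
--     the output is zero-padded back to the input length.
--     (Returns a fresh list; A mutates its argument in place.)"""
--     sz = len(row)
--     out = []
--     score = 0
--     i = 0
--     while i < sz:
--         if i + 1 < sz and row[i] == row[i + 1]:
--             v = row[i] + row[i + 1]
--             out.append(v)
--             score += v
--             i += 2
--         else:
--             out.append(row[i])
--             i += 1
--     out.extend([0] * (sz - len(out)))
--     return out, score
-- ===== Notes on version B (the rewrite author's own statement) =====
-- stated objective: faster
-- what changed: Replaced the nested index loops that shift the tail left and zero-fill after every merge with a single left-to-right pass that consumes each equal pair once and zero-pads the result to the input length at the end.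
import Mathlib
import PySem

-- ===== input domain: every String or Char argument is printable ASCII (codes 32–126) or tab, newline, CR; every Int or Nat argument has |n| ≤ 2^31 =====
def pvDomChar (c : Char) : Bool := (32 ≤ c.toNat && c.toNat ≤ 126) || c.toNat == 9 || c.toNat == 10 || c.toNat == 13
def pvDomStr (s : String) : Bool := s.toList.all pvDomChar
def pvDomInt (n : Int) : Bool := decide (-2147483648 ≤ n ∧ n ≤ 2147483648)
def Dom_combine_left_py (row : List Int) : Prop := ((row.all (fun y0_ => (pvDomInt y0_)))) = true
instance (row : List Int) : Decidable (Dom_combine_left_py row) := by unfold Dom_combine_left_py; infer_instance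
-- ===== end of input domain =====

set_option maxRecDepth 8192


-- B replaces A's nested shift-and-zero-fill index loops by one left-to-right pass that merges
-- each equal pair once and zero-pads at the end (equivalence is about the RETURN value:
-- A mutates `row` in place, B builds a fresh list).

-- ===== PORT A =====
-- One outer-loop iteration of A: compare row[j] with row[j+1]; on equality merge into j,
-- shift the tail left by the inner loop, and zero the last cell.  All indices are provably
-- in range (0 ≤ j ≤ sz-2), so the total forms pyGetD/pySetD are exact here.
def pvStepA (sz : Int) (st : List Int × Int) (j : Int) : List Int × Int :=
  if PySem.List.pyGetD st.1 j 0 = PySem.List.pyGetD st.1 (j + 1) 0 then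
    let r := PySem.List.pySetD st.1 j (PySem.List.pyGetD st.1 j 0 + PySem.List.pyGetD st.1 (j + 1) 0)
    let score := st.2 + PySem.List.pyGetD r j 0
    let r := (PySem.List.pyRange (j + 1) (sz - 1) 1).foldl
      (fun r2 k => PySem.List.pySetD r2 k (PySem.List.pyGetD r2 (k + 1) 0)) r
    let r := PySem.List.pySetD r (sz - 1) 0
    (r, score)
  else st

def combine_left_py (row : List Int) : List Int × Int :=
  (PySem.List.pyRange 0 ((row.length : Int) - 1) 1).foldl (pvStepA (row.length : Int)) (row, 0)

-- ===== PORT B =====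
-- The while loop of Source B: `out`/`score` are the accumulators, the list argument is row[i:].
def pvGoB (xs : List Int) (out : List Int) (score : Int) : List Int × Int :=
  match xs with
  | [] => (out, score)
  | [x] => (out ++ [x], score)
  | x :: y :: t =>
    if x = y then pvGoB t (out ++ [x + y]) (score + (x + y))
    else pvGoB (y :: t) (out ++ [x]) score
termination_by xs.length

def combine_left_py_alt (row : List Int) : List Int × Int :=
  let p := pvGoB row [] 0
  (p.1 ++ List.replicate (row.length - p.1.length) 0, p.2)

-- ===== PRECONDITION & SPEC =====
def Spec_combine_left_py (row : List Int) (out : List Int × Int) : Prop := out = combine_left_py_alt row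
instance (row : List Int) (out : List Int × Int) : Decidable (Spec_combine_left_py row out) := by unfold Spec_combine_left_py; infer_instance

-- ===== CLAIM (what is proved, stated in full; the proofs are below) =====
def Claim_equal_combine_left_py : Prop := ∀ (row : List Int), Dom_combine_left_py row → Spec_combine_left_py row (combine_left_py row)

-- ===== LEMMAS AND PROOFS =====

-- A's outer loop, expressed on the suffix row[j:]: a merge at j rewrites the suffix
-- x :: y :: t to (x+y) :: (t ++ [0]) and moves on past the merged cell.
def pvF : List Int → List Int × Int
  | [] => ([], 0)
  | [x] => ([x], 0)
  | x :: y :: t =>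
    if x = y then
      let p := pvF (t ++ [0])
      ((x + y) :: p.1, p.2 + (x + y))
    else
      let p := pvF (y :: t)
      (x :: p.1, p.2)
termination_by l => l.length
decreasing_by all_goals simp

theorem pvGoB_acc_aux : ∀ (n : Nat) (xs : List Int), xs.length ≤ n → ∀ (out : List Int) (s : Int),
    pvGoB xs out s = (out ++ (pvGoB xs [] 0).1, s + (pvGoB xs [] 0).2) := by
  intro n
  induction n with
  | zero =>
    intro xs h out s
    match xs with
    | [] => simp [pvGoB]
    | x :: t => simp at h
  | succ n IH =>
    intro xs h out s
    match xs with
    | [] => simp [pvGoB]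
    | [x] => simp [pvGoB]
    | x :: y :: t =>
      have ht : t.length ≤ n := by simp at h; omega
      have hyt : (y :: t).length ≤ n := by simp at h ⊢; omega
      by_cases hxy : x = y
      · rw [pvGoB, pvGoB, if_pos hxy, if_pos hxy]
        rw [IH t ht (out ++ [x + y]) (s + (x + y)), IH t ht ([] ++ [x + y]) (0 + (x + y))]
        rw [Prod.mk.injEq]
        refine ⟨by simp [List.append_assoc], by omega⟩
      · rw [pvGoB, pvGoB, if_neg hxy, if_neg hxy]
        rw [IH (y :: t) hyt (out ++ [x]) s, IH (y :: t) hyt ([] ++ [x]) 0]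
        rw [Prod.mk.injEq]
        refine ⟨by simp [List.append_assoc], by omega⟩

theorem pvGoB_acc (xs : List Int) (out : List Int) (s : Int) :
    pvGoB xs out s = (out ++ (pvGoB xs [] 0).1, s + (pvGoB xs [] 0).2) :=
  pvGoB_acc_aux xs.length xs (le_refl _) out s

theorem pvGoB_len_le_aux : ∀ (n : Nat) (xs : List Int), xs.length ≤ n →
    (pvGoB xs [] 0).1.length ≤ xs.length := by
  intro n
  induction n with
  | zero =>
    intro xs h
    match xs with
    | [] => simp [pvGoB]
    | x :: t => simp at h
  | succ n IH =>
    intro xs h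
    match xs with
    | [] => simp [pvGoB]
    | [x] => simp [pvGoB]
    | x :: y :: t =>
      have ht : t.length ≤ n := by simp at h; omega
      have hyt : (y :: t).length ≤ n := by simp at h ⊢; omega
      by_cases hxy : x = y
      · rw [pvGoB, if_pos hxy, pvGoB_acc]
        have := IH t ht
        simp at this ⊢; omega
      · rw [pvGoB, if_neg hxy, pvGoB_acc]
        have := IH (y :: t) hyt
        simp at this ⊢; omega

theorem pvGoB_len_le (xs : List Int) : (pvGoB xs [] 0).1.length ≤ xs.length :=
  pvGoB_len_le_aux xs.length xs (le_refl _)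

theorem pvF_zeros : ∀ (k : Nat), pvF (List.replicate k 0) = (List.replicate k 0, 0) := by
  intro k
  induction k using Nat.strong_induction_on with
  | _ k IH =>
  match k with
  | 0 => simp [pvF]
  | 1 => simp [pvF]
  | (m + 2) =>
    rw [List.replicate_succ, List.replicate_succ, pvF, if_pos rfl]
    rw [show List.replicate m (0 : Int) ++ [0] = List.replicate (m + 1) 0 from
      (List.replicate_succ' (a := (0 : Int)) (n := m)).symm]
    rw [IH (m + 1) (by omega)]
    simp [List.replicate_succ]

theorem pvF_pad_aux : ∀ (n : Nat) (t : List Int), t.length ≤ n → ∀ (k : Nat),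
    pvF (t ++ List.replicate k 0) =
      ((pvGoB t [] 0).1 ++ List.replicate (t.length + k - (pvGoB t [] 0).1.length) 0,
       (pvGoB t [] 0).2) := by
  intro n
  induction n with
  | zero =>
    intro t h k
    match t with
    | [] => simpa [pvGoB] using pvF_zeros k
    | x :: t' => simp at h
  | succ n IH =>
    intro t h k
    match t with
    | [] => simpa [pvGoB] using pvF_zeros k
    | [x] =>
      match k with
      | 0 => simp [pvF, pvGoB]
      | (m + 1) =>
        rw [List.replicate_succ, pvGoB]
        simp only [List.singleton_append]
        by_cases hx : x = (0 : Int)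
        · subst hx
          rw [show ((0 : Int) :: 0 :: List.replicate m 0) = List.replicate (m + 2) 0 by
            simp [List.replicate_succ]]
          rw [pvF_zeros]
          simp [List.replicate_succ]
        · rw [pvF, if_neg hx]
          rw [show ((0 : Int) :: List.replicate m 0) = List.replicate (m + 1) 0 by
            simp [List.replicate_succ]]
          rw [pvF_zeros]
          simp
    | x :: y :: t' =>
      have ht : t'.length ≤ n := by simp at h; omega
      have hyt : (y :: t').length ≤ n := by simp at h ⊢; omega
      by_cases hxy : x = y
      · simp only [List.cons_append]
        rw [pvF, if_pos hxy, pvGoB, if_pos hxy, pvGoB_acc]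
        rw [show t' ++ List.replicate k 0 ++ [(0 : Int)] = t' ++ List.replicate (k + 1) 0 by
          simp [List.replicate_succ' (a := (0 : Int)) (n := k)]]
        rw [IH t' ht (k + 1)]
        have hle := pvGoB_len_le t'
        rw [Prod.mk.injEq]
        dsimp only
        constructor
        · simp only [List.nil_append, List.singleton_append, List.cons_append]
          exact congrArg
            (fun c => (x + y) :: ((pvGoB t' [] 0).1 ++ List.replicate c (0 : Int)))
            (by simp; omega)
        · simp; ring
      · simp only [List.cons_append]
        rw [pvF, if_neg hxy, pvGoB, if_neg hxy, pvGoB_acc]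
        rw [← List.cons_append]
        rw [IH (y :: t') hyt k]
        have hle := pvGoB_len_le (y :: t')
        rw [Prod.mk.injEq]
        dsimp only
        constructor
        · simp only [List.nil_append, List.singleton_append, List.cons_append]
          exact congrArg
            (fun c => x :: ((pvGoB (y :: t') [] 0).1 ++ List.replicate c (0 : Int)))
            (by simp; omega)
        · simp

theorem pvF_pad (t : List Int) (k : Nat) :
    pvF (t ++ List.replicate k 0) =
      ((pvGoB t [] 0).1 ++ List.replicate (t.length + k - (pvGoB t [] 0).1.length) 0,
       (pvGoB t [] 0).2) :=
  pvF_pad_aux t.length t (le_refl _) k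

-- A's inner shift loop, structurally: over indices |pre| .. |pre|+|mid|-1 it moves each
-- next element one slot left; `post` (nonempty) is never written past.
theorem pvShift_eq (mid : List Int) : ∀ (pre post : List Int), post ≠ [] →
    (PySem.List.pyRange (pre.length : Int) ((pre.length : Int) + mid.length) 1).foldl
        (fun r2 k => PySem.List.pySetD r2 k (PySem.List.pyGetD r2 (k + 1) 0))
        (pre ++ mid ++ post) =
      pre ++ ((mid ++ post).drop 1).take mid.length ++ post := by
  induction mid with
  | nil =>
    intro pre post hpost
    simp [PySem.List.pyRange_one_eq_nil]
  | cons m mid' IH =>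
    intro pre post hpost
    rw [show ((pre.length : Int) + (m :: mid').length) = (pre.length : Int) + 1 + mid'.length by
      simp; ring]
    rw [PySem.List.pyRange_one_cons (by omega)]
    simp only [List.foldl_cons]
    have hcons : ∃ c tl, mid' ++ post = c :: tl := by
      cases h : mid' ++ post with
      | nil => exact absurd (List.append_eq_nil_iff.mp h).2 hpost
      | cons c tl => exact ⟨c, tl, rfl⟩
    obtain ⟨c, tl, hct⟩ := hcons
    have hstep :
        PySem.List.pySetD (pre ++ (m :: mid') ++ post) (pre.length : Int)
          (PySem.List.pyGetD (pre ++ (m :: mid') ++ post) ((pre.length : Int) + 1) 0)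
          = (pre ++ [c]) ++ mid' ++ post := by
      have hget : PySem.List.pyGetD (pre ++ (m :: mid') ++ post) ((pre.length : Int) + 1) 0 = c := by
        rw [show ((pre.length : Int) + 1) = (((pre.length + 1 : Nat)) : Int) by push_cast; ring]
        rw [PySem.List.pyGetD_natCast]
        rw [show pre ++ (m :: mid') ++ post = pre ++ (m :: (mid' ++ post)) by simp]
        rw [hct]
        rw [List.getD_eq_getElem?_getD, List.getElem?_append_right (by simp)]
        simp
      rw [hget, PySem.List.pySetD_natCast]
      rw [show pre ++ (m :: mid') ++ post = pre ++ (m :: (mid' ++ post)) by simp]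
      rw [List.set_append_right _ _ (le_refl _)]
      simp [hct]
    rw [hstep]
    rw [show ((pre.length : Int) + 1) = (((pre ++ [c]).length : Nat) : Int) by simp]
    rw [IH (pre ++ [c]) post hpost]
    simp [hct, List.take_succ_cons, List.append_assoc]

-- empty outer range: the suffix row[j:] has at most one cell and pvF fixes it
theorem pvOuter_nil (sz j : Nat) (r : List Int) (s : Int) (hr : r.length = sz)
    (hj : j ≤ sz) (h : (sz : Int) - 1 ≤ (j : Int)) :
    (PySem.List.pyRange (j : Int) ((sz : Int) - 1) 1).foldl (pvStepA (sz : Int)) (r, s) =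
      (r.take j ++ (pvF (r.drop j)).1, s + (pvF (r.drop j)).2) := by
  rw [PySem.List.pyRange_one_eq_nil h]
  have hlen : (r.drop j).length ≤ 1 := by simp [hr]; omega
  match hdr : r.drop j with
  | [] =>
    have : r.length ≤ j := by
      have := congrArg List.length hdr; simp at this; omega
    simp [pvF, List.take_of_length_le this]
  | [x] =>
    have hx : r.take j ++ [x] = r := by
      conv_rhs => rw [← List.take_append_drop j r]
      rw [hdr]
    simp [pvF, hx]
  | x :: y :: t => rw [hdr] at hlen; simp at hlen

theorem pvOuter_aux : ∀ (n : Nat) (sz j : Nat) (r : List Int) (s : Int), r.length = sz →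
    j ≤ sz → sz - j ≤ n →
    (PySem.List.pyRange (j : Int) ((sz : Int) - 1) 1).foldl (pvStepA (sz : Int)) (r, s) =
      (r.take j ++ (pvF (r.drop j)).1, s + (pvF (r.drop j)).2) := by
  intro n
  induction n with
  | zero =>
    intro sz j r s hr hj hn
    exact pvOuter_nil sz j r s hr hj (by omega)
  | succ n IH =>
    intro sz j r s hr hj hn
    by_cases hjs : (j : Int) < (sz : Int) - 1
    case neg => exact pvOuter_nil sz j r s hr hj (by omega)
    case pos =>
      have hjlt : j + 1 < sz := by omega
      have hjr : j < r.length := by omega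
      have hj1r : j + 1 < r.length := by omega
      rw [PySem.List.pyRange_one_cons hjs]
      simp only [List.foldl_cons]
      have hdropj : r.drop j = r[j] :: r[j + 1] :: r.drop (j + 2) := by
        rw [List.drop_eq_getElem_cons hjr, List.drop_eq_getElem_cons hj1r]
      have hget1 : PySem.List.pyGetD r (j : Int) 0 = r[j] := by
        rw [PySem.List.pyGetD_natCast, List.getD_eq_getElem r 0 hjr]
      have hget2 : PySem.List.pyGetD r ((j : Int) + 1) 0 = r[j + 1] := by
        rw [show ((j : Int) + 1) = (((j + 1 : Nat)) : Int) by push_cast; ring]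
        rw [PySem.List.pyGetD_natCast, List.getD_eq_getElem r 0 hj1r]
      by_cases hxy : r[j] = r[j + 1]
      case neg =>
        have hstep : pvStepA (sz : Int) (r, s) (j : Int) = (r, s) := by
          rw [pvStepA, if_neg (by rw [hget1, hget2]; exact hxy)]
        rw [hstep]
        rw [show ((j : Int) + 1) = (((j + 1 : Nat)) : Int) by push_cast; ring]
        rw [IH sz (j + 1) r s hr (by omega) (by omega)]
        rw [hdropj, pvF, if_neg hxy]
        rw [← List.drop_eq_getElem_cons hj1r]
        rw [Prod.mk.injEq]
        refine ⟨?_, rfl⟩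
        have ht1 : r.take (j + 1) = r.take j ++ [r[j]] := by
          rw [List.take_add_one, List.getElem?_eq_getElem hjr]
          rfl
        rw [ht1, List.append_assoc]
        rfl
      case pos =>
        set v : Int := r[j] + r[j + 1] with hv
        have hr1 : PySem.List.pySetD r (j : Int)
            (PySem.List.pyGetD r (j : Int) 0 + PySem.List.pyGetD r ((j : Int) + 1) 0)
            = r.take j ++ v :: r.drop (j + 1) := by
          rw [hget1, hget2, PySem.List.pySetD_natCast, List.set_eq_take_append_cons_drop, if_pos hjr]
        have hscore : PySem.List.pyGetD (r.take j ++ v :: r.drop (j + 1)) (j : Int) 0 = v := by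
          rw [PySem.List.pyGetD_natCast, List.getD_eq_getElem?_getD,
              List.getElem?_append_right (by simp)]
          simp [List.length_take, Nat.min_eq_left hjr.le]
        have hpre : (r.take j ++ [v]).length = j + 1 := by simp; omega
        have hdd : (r.drop (j + 1)).drop (sz - j - 2) = r.drop (sz - 1) := by
          rw [List.drop_drop]
          congr 1
          omega
        have hmidpost : r.drop (j + 1) = (r.drop (j + 1)).take (sz - j - 2) ++ r.drop (sz - 1) := by
          conv_lhs => rw [← List.take_append_drop (sz - j - 2) (r.drop (j + 1))]
          rw [hdd]
        have hshift :
            (PySem.List.pyRange ((j : Int) + 1) ((sz : Int) - 1) 1).foldl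
              (fun r2 k => PySem.List.pySetD r2 k (PySem.List.pyGetD r2 (k + 1) 0))
              (r.take j ++ v :: r.drop (j + 1))
            = (r.take j ++ [v]) ++ r.drop (j + 2) ++ r.drop (sz - 1) := by
          have h1 : r.take j ++ v :: r.drop (j + 1)
              = (r.take j ++ [v]) ++ (r.drop (j + 1)).take (sz - j - 2) ++ r.drop (sz - 1) := by
            rw [List.append_assoc, List.append_assoc]
            congr 1
            simpa using congrArg (fun l => v :: l) hmidpost
          have hpostne : r.drop (sz - 1) ≠ [] := by
            intro hne
            have := congrArg List.length hne
            simp [hr] at this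
            omega
          rw [h1]
          have hlen1 : ((r.drop (j + 1)).take (sz - j - 2)).length = sz - j - 2 := by
            simp [hr]; omega
          rw [show ((j : Int) + 1) = (((r.take j ++ [v]).length : Nat) : Int) by
            rw [hpre]; push_cast; ring]
          rw [show ((sz : Int) - 1) = (((r.take j ++ [v]).length : Nat) : Int)
              + (((r.drop (j + 1)).take (sz - j - 2)).length : Nat) by
            rw [hpre, hlen1]; push_cast; omega]
          rw [pvShift_eq _ _ _ hpostne]
          congr 1
          congr 1
          rw [← hmidpost, hlen1]
          rw [show (r.drop (j + 1)).drop 1 = r.drop (j + 2) by rw [List.drop_drop]]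
          apply List.take_of_length_le
          simp [hr]; omega
        have hzero :
            PySem.List.pySetD ((r.take j ++ [v]) ++ r.drop (j + 2) ++ r.drop (sz - 1))
              ((sz : Int) - 1) 0
              = (r.take j ++ [v]) ++ r.drop (j + 2) ++ [0] := by
          rw [show ((sz : Int) - 1) = (((sz - 1 : Nat)) : Int) by push_cast; omega]
          rw [PySem.List.pySetD_natCast]
          rcases hsing : r.drop (sz - 1) with _ | ⟨a, tl⟩
          · exfalso
            have := congrArg List.length hsing; simp [hr] at this; omega
          · have htl : tl = [] := by
              have := congrArg List.length hsing; simp [hr] at this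
              cases tl with
              | nil => rfl
              | cons b tb => simp at this; omega
            subst htl
            have hlenA : ((r.take j ++ [v]) ++ r.drop (j + 2)).length = sz - 1 := by
              simp [hr]; omega
            rw [List.set_append_right _ _ (le_of_eq hlenA)]
            rw [show sz - 1 - ((r.take j ++ [v]) ++ r.drop (j + 2)).length = 0 by omega]
            simp
        have hstep : pvStepA (sz : Int) (r, s) (j : Int)
            = ((r.take j ++ [v]) ++ r.drop (j + 2) ++ [0], s + v) := by
          rw [pvStepA, if_pos (by rw [hget1, hget2]; exact hxy)]
          simp only [hr1, hscore, hshift, hzero]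
        rw [hstep]
        have hlen3 : ((r.take j ++ [v]) ++ r.drop (j + 2) ++ [0]).length = sz := by
          simp [hr]; omega
        rw [show ((j : Int) + 1) = (((j + 1 : Nat)) : Int) by push_cast; ring]
        rw [IH sz (j + 1) _ _ hlen3 (by omega) (by omega)]
        have htake : ((r.take j ++ [v]) ++ r.drop (j + 2) ++ [0]).take (j + 1)
            = r.take j ++ [v] := by
          rw [List.append_assoc, show j + 1 = (r.take j ++ [v]).length from hpre.symm,
              List.take_left]
        have hdrop : ((r.take j ++ [v]) ++ r.drop (j + 2) ++ [0]).drop (j + 1)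
            = r.drop (j + 2) ++ [0] := by
          rw [List.append_assoc, show j + 1 = (r.take j ++ [v]).length from hpre.symm,
              List.drop_left]
        rw [htake, hdrop, hdropj, pvF, if_pos hxy]
        rw [Prod.mk.injEq]
        dsimp only
        rw [← hv]
        refine ⟨by simp [List.append_assoc], by omega⟩

theorem pvOuter_eq (sz : Nat) (j : Nat) (r : List Int) (s : Int) (hr : r.length = sz)
    (hj : j ≤ sz) :
    (PySem.List.pyRange (j : Int) ((sz : Int) - 1) 1).foldl (pvStepA (sz : Int)) (r, s) =
      (r.take j ++ (pvF (r.drop j)).1, s + (pvF (r.drop j)).2) :=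
  pvOuter_aux sz sz j r s hr hj (by omega)

-- ===== VERDICT (by name: the statement is the Claim_ definition above) =====
theorem combine_left_py_spec : Claim_equal_combine_left_py := by
  intro row _
  show combine_left_py row = combine_left_py_alt row
  have h0 := pvOuter_eq row.length 0 row 0 rfl (Nat.zero_le _)
  have hpad := pvF_pad row 0
  simp only [List.replicate_zero, List.append_nil, Nat.add_zero] at hpad
  simp only [combine_left_py, combine_left_py_alt]
  rw [show ((0 : Int)) = ((0 : Nat) : Int) from rfl] at h0 ⊢
  rw [h0]
  simp only [List.take_zero, List.drop_zero, List.nil_append, hpad]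
  simp
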